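-- pv_equiv track=rewrite | github.com/luckyv180/Plivo_assignment_lucky_verma | src/rules.py | collapse_spelled_letters
-- ===== SOURCE A (Python) =====
-- def collapse_spelled_letters(s: str) -> str:
--     """Collapse sequences like 'g m a i l' -> 'gmail'."""
--     tokens = s.split()
--     out, i = [], 0
--     while i < len(tokens):
--         if i + 4 < len(tokens) and all(len(t) == 1 for t in tokens[i:i+5]):
--             out.append(''.join(tokens[i:i+5]))
--             i += 5
--         else:
--             out.append(tokens[i])
--             i += 1
--     return ' '.join(out)
-- ===== SOURCE B (Python) =====
-- def collapse_spelled_letters(s: str) -> str: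
--     """Collapse sequences like 'g m a i l' -> 'gmail' (stream with a buffer)."""
--     out, buf = [], []
--     for t in s.split():
--         if len(t) == 1:
--             buf.append(t)
--             if len(buf) == 5:
--                 out.append(''.join(buf))
--                 buf = []
--         else:
--             out.extend(buf)
--             buf = []
--             out.append(t)
--     out.extend(buf)
--     return ' '.join(out)
-- ===== Notes on version B (the rewrite author's own statement) =====
-- stated objective: alternative
-- what changed: Replaces A's 5-token lookahead with slicing and index arithmetic by a single streaming pass that maintains a buffer of pending single-character tokens, emits a joined group whenever the buffer reaches 5, and flushes it individually at any multi-character token or at the end.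
import Mathlib
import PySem

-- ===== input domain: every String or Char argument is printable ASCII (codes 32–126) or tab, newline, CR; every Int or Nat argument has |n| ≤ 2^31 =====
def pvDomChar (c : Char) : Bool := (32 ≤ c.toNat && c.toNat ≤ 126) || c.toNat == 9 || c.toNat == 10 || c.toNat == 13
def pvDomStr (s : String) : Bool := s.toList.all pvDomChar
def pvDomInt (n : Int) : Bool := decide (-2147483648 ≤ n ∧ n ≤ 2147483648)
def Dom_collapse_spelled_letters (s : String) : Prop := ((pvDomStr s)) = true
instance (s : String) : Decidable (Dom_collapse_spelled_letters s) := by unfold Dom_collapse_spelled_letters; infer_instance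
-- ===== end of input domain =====

-- B streams once with a buffer of pending single-char tokens (flush on boundary) instead of
-- A's 5-token lookahead with slices; same output, a different decomposition (alternative).

-- ===== PORT A =====
-- A's while loop over the index i, reading tokens[i:i+5]: ported as lookahead recursion on
-- the suffix tokens[i:] (the 5-element pattern is the slice; 'i+4 < len(tokens)' is the
-- pattern having 5 elements).
def pvLoopA : List String → List String
  | t0 :: t1 :: t2 :: t3 :: t4 :: rest =>
      if PySem.Str.len t0 = 1 ∧ PySem.Str.len t1 = 1 ∧ PySem.Str.len t2 = 1 ∧
         PySem.Str.len t3 = 1 ∧ PySem.Str.len t4 = 1 then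
        PySem.Str.join "" [t0, t1, t2, t3, t4] :: pvLoopA rest
      else
        t0 :: pvLoopA (t1 :: t2 :: t3 :: t4 :: rest)
  | t :: rest => t :: pvLoopA rest
  | [] => []

def collapse_spelled_letters (s : String) : String :=
  PySem.Str.join " " (pvLoopA (PySem.Str.split₀ s))

-- ===== PORT B =====
-- B's loop body: state (out, buf).
def pvStepB (st : List String × List String) (t : String) : List String × List String :=
  if PySem.Str.len t = 1 then
    let buf' := st.2 ++ [t]
    if buf'.length = 5 then (st.1 ++ [PySem.Str.join "" buf'], []) else (st.1, buf')
  else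
    (st.1 ++ st.2 ++ [t], [])

def collapse_spelled_letters_alt (s : String) : String :=
  PySem.Str.join " "
    (((PySem.Str.split₀ s).foldl pvStepB ([], [])).1 ++
     ((PySem.Str.split₀ s).foldl pvStepB ([], [])).2)

-- ===== PRECONDITION & SPEC =====
def Spec_collapse_spelled_letters (s : String) (out : String) : Prop := out = collapse_spelled_letters_alt s
instance (s : String) (out : String) : Decidable (Spec_collapse_spelled_letters s out) := by unfold Spec_collapse_spelled_letters; infer_instance

-- ===== CLAIM (what is proved, stated in full; the proofs are below) =====
def Claim_equal_collapse_spelled_letters : Prop := ∀ (s : String), Dom_collapse_spelled_letters s → Spec_collapse_spelled_letters s (collapse_spelled_letters s)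

-- ===== LEMMAS AND PROOFS =====

-- pvLoopA leaves a short list (< 5 tokens) unchanged.
lemma pvLoopA_small (l : List String) (h : l.length ≤ 4) : pvLoopA l = l := by
  match l with
  | [] => simp [pvLoopA]
  | [a] => simp [pvLoopA]
  | [a, b] => simp [pvLoopA]
  | [a, b, c] => simp [pvLoopA]
  | [a, b, c, d] => simp [pvLoopA]
  | a :: b :: c :: d :: e :: r => simp at h; omega

-- A non-single token at the head is emitted as-is.
lemma pvLoopA_cons0 (t : String) (ts : List String) (ht : PySem.Str.len t ≠ 1) :
    pvLoopA (t :: ts) = t :: pvLoopA ts := by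
  match ts with
  | [] => simp [pvLoopA]
  | [a] => simp [pvLoopA]
  | [a, b] => simp [pvLoopA]
  | [a, b, c] => simp [pvLoopA]
  | a :: b :: c :: d :: r =>
      rw [pvLoopA, if_neg]
      intro hc
      exact ht hc.1

lemma pvLoopA_cons1 (x t : String) (ts : List String) (ht : PySem.Str.len t ≠ 1) :
    pvLoopA (x :: t :: ts) = x :: t :: pvLoopA ts := by
  match ts with
  | [] => simp [pvLoopA]
  | [a] => simp [pvLoopA]
  | [a, b] => simp [pvLoopA]
  | a :: b :: c :: r =>
      rw [pvLoopA, if_neg, pvLoopA_cons0 t _ ht]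
      intro hc
      exact ht hc.2.1

lemma pvLoopA_cons2 (x y t : String) (ts : List String) (ht : PySem.Str.len t ≠ 1) :
    pvLoopA (x :: y :: t :: ts) = x :: y :: t :: pvLoopA ts := by
  match ts with
  | [] => simp [pvLoopA]
  | [a] => simp [pvLoopA]
  | a :: b :: r =>
      rw [pvLoopA, if_neg, pvLoopA_cons1 y t _ ht]
      intro hc
      exact ht hc.2.2.1

lemma pvLoopA_cons3 (x y z t : String) (ts : List String) (ht : PySem.Str.len t ≠ 1) :
    pvLoopA (x :: y :: z :: t :: ts) = x :: y :: z :: t :: pvLoopA ts := by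
  match ts with
  | [] => simp [pvLoopA]
  | a :: r =>
      rw [pvLoopA, if_neg, pvLoopA_cons2 y z t _ ht]
      intro hc
      exact ht hc.2.2.2.1

lemma pvLoopA_cons4 (x y z w t : String) (ts : List String) (ht : PySem.Str.len t ≠ 1) :
    pvLoopA (x :: y :: z :: w :: t :: ts) = x :: y :: z :: w :: t :: pvLoopA ts := by
  rw [pvLoopA, if_neg, pvLoopA_cons3 y z w t _ ht]
  intro hc
  exact ht hc.2.2.2.2

-- boundary flush: buf (≤ 4 pending tokens) followed by a non-single token t
lemma pvLoopA_flush (buf : List String) (t : String) (ts : List String)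
    (hb : buf.length ≤ 4) (ht : PySem.Str.len t ≠ 1) :
    pvLoopA (buf ++ t :: ts) = buf ++ t :: pvLoopA ts := by
  match buf with
  | [] => exact pvLoopA_cons0 t ts ht
  | [a] => exact pvLoopA_cons1 a t ts ht
  | [a, b] => exact pvLoopA_cons2 a b t ts ht
  | [a, b, c] => exact pvLoopA_cons3 a b c t ts ht
  | [a, b, c, d] => exact pvLoopA_cons4 a b c d t ts ht
  | a :: b :: c :: d :: e :: r => simp at hb; omega

-- main invariant: folding B's step from (out, buf) and flushing equals out ++ A's loop on buf ++ ts
lemma pvMain (ts : List String) : ∀ (out buf : List String),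
    buf.length ≤ 4 → (∀ x ∈ buf, PySem.Str.len x = 1) →
    (ts.foldl pvStepB (out, buf)).1 ++ (ts.foldl pvStepB (out, buf)).2
      = out ++ pvLoopA (buf ++ ts) := by
  induction ts with
  | nil =>
      intro out buf hb _
      simp [pvLoopA_small buf hb]
  | cons t ts ih =>
      intro out buf hb hs
      by_cases ht : PySem.Str.len t = 1
      · by_cases h5 : (buf ++ [t]).length = 5
        · have hb4 : buf.length = 4 := by simp at h5; omega
          match buf, hb4 with
          | [a, b, c, d], _ =>
            simp only [List.foldl_cons]
            rw [show pvStepB (out, [a,b,c,d]) t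
                  = (out ++ [PySem.Str.join "" ([a,b,c,d] ++ [t])], []) from by
                  simp only [pvStepB]; rw [if_pos ht, if_pos h5]]
            rw [ih (out ++ [PySem.Str.join "" ([a,b,c,d] ++ [t])]) [] (by simp) (by simp)]
            have ha := hs a (by simp); have hbb := hs b (by simp)
            have hc := hs c (by simp); have hd := hs d (by simp)
            rw [show ([a,b,c,d] : List String) ++ t :: ts = a :: b :: c :: d :: t :: ts by simp]
            rw [pvLoopA, if_pos ⟨ha, hbb, hc, hd, ht⟩]
            simp
        · simp only [List.foldl_cons]
          rw [show pvStepB (out, buf) t = (out, buf ++ [t]) from by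
                simp only [pvStepB]; rw [if_pos ht, if_neg h5]]
          have hb' : (buf ++ [t]).length ≤ 4 := by simp at h5 ⊢; omega
          rw [ih out (buf ++ [t]) hb' (by intro x hx; rcases List.mem_append.1 hx with h | h
                                          · exact hs x h
                                          · simp at h; subst h; exact ht)]
          simp
      · simp only [List.foldl_cons]
        rw [show pvStepB (out, buf) t = (out ++ buf ++ [t], []) from by
              simp only [pvStepB]; rw [if_neg ht]]
        rw [ih (out ++ buf ++ [t]) [] (by simp) (by simp)]
        rw [pvLoopA_flush buf t ts hb ht]
        simp

-- ===== VERDICT (by name: the statement is the Claim_ definition above) =====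
theorem collapse_spelled_letters_spec : Claim_equal_collapse_spelled_letters := by
  intro s _
  unfold Spec_collapse_spelled_letters collapse_spelled_letters collapse_spelled_letters_alt
  rw [pvMain (PySem.Str.split₀ s) [] [] (by simp) (by simp)]
  simp
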